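-- pv_equiv track=rewrite | github.com/yuvika022/100DaysOfCode-2025 | DSA/Sandeep_Jha_590014310/week1/day3/d3_q1.py | k_frequency_element_sum
-- ===== SOURCE A (Python) =====
-- def k_frequency_element_sum(nums, k):
--     frequency_map = {}
--
--     for num in nums:
--         frequency_map[num] = frequency_map.get(num, 0) + 1
--
--     result = 0
--     for num, freq in frequency_map.items():
--         if freq == k:
--             result += num
--
--     return result
-- ===== SOURCE B (Python) =====
-- def k_frequency_element_sum(nums, k):
--     s = sorted(nums)
--     n = len(s)
--     total = 0
--     i = 0
--     while i < n:
--         j = i + 1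
--         while j < n and s[j] == s[i]:
--             j += 1
--         if j - i == k:
--             total += s[i]
--         i = j
--     return total
-- ===== Notes on version B (the rewrite author's own statement) =====
-- stated objective: alternative
-- what changed: Replaces the frequency dictionary with sorting nums and scanning consecutive equal runs, adding a run's value when its length equals k.
import Mathlib
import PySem

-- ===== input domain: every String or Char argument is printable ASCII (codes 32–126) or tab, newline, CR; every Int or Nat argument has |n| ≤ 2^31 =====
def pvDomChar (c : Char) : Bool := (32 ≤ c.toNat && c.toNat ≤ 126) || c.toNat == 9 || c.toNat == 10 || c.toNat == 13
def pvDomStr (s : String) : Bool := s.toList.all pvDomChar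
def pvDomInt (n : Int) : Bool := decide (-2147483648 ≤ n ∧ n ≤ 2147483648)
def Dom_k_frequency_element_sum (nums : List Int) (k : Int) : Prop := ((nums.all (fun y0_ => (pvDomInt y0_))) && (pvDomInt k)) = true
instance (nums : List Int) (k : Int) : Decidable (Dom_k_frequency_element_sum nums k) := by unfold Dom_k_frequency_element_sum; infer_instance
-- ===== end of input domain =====

-- B replaces A's frequency dictionary with a sort-then-scan over consecutive equal runs (alternative decomposition, similar cost).

-- ===== PORT A =====
def k_frequency_element_sum (nums : List Int) (k : Int) : Int :=
  let frequency_map := nums.foldl (fun d num => d.insert num (d.getD num 0 + 1)) (PySem.Dict.empty)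
  frequency_map.items.foldl (fun result p => if p.2 = k then result + p.1 else result) 0

-- ===== PORT B =====
-- j ≤ runEnd s v n j (needed for termination of the outer loop)
def runEnd (s : List Int) (v : Int) (n : Nat) (j : Nat) : Nat :=
  if j < n ∧ s.getD j 0 = v then runEnd s v n (j + 1) else j
termination_by n - j
decreasing_by omega

theorem runEnd_ge (s : List Int) (v : Int) (n j : Nat) : j ≤ runEnd s v n j := by
  induction hd : n - j using Nat.strong_induction_on generalizing j with
  | _ d ih =>
    rw [runEnd]
    split
    · rename_i h
      have := ih (n - (j + 1)) (by omega) (j + 1) rfl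
      omega
    · exact le_refl j

-- the outer 'while i < n' loop of Source B (i, total are the mutating locals; j is the inner while's result)
def outerB (k : Int) (s : List Int) (n : Nat) (i : Nat) (total : Int) : Int :=
  if i < n then
    let j := runEnd s (s.getD i 0) n (i + 1)
    outerB k s n j (total + (if ((j : Int) - (i : Int)) = k then s.getD i 0 else 0))
  else total
termination_by n - i
decreasing_by have := runEnd_ge s (s.getD i 0) n (i + 1); omega

def k_frequency_element_sum_alt (nums : List Int) (k : Int) : Int :=
  let s := PySem.List.sorted nums (fun x => x) false
  outerB k s s.length 0 0

-- ===== PRECONDITION & SPEC =====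
def Spec_k_frequency_element_sum (nums : List Int) (k : Int) (out : Int) : Prop := out = k_frequency_element_sum_alt nums k
instance (nums : List Int) (k : Int) (out : Int) : Decidable (Spec_k_frequency_element_sum nums k out) := by unfold Spec_k_frequency_element_sum; infer_instance

-- ===== CLAIM (what is proved, stated in full; the proofs are below) =====
def Claim_equal_k_frequency_element_sum : Prop := ∀ (nums : List Int) (k : Int), Dom_k_frequency_element_sum nums k → Spec_k_frequency_element_sum nums k (k_frequency_element_sum nums k)

-- ===== LEMMAS AND PROOFS =====

-- proof-layer view of the inner while loop: leading run of v and the remainder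
def splitRun (v : Int) : List Int → Nat × List Int
  | [] => (0, [])
  | x :: xs => if x = v then ((splitRun v xs).1 + 1, (splitRun v xs).2) else (0, x :: xs)

theorem splitRun_len_le (v : Int) (xs : List Int) : (splitRun v xs).2.length ≤ xs.length := by
  induction xs with
  | nil => simp [splitRun]
  | cons x xs ih => by_cases h : x = v <;> simp [splitRun, h] <;> try omega


-- common specification: the sum over distinct values of l whose multiplicity in l is k
def specSum (k : Int) (l : List Int) : Int :=
  ((PySem.Set.ofList l).map (fun v => if (l.count v : Int) = k then v else 0)).sum

theorem foldl_if_pair (k a : Int) (l : List (Int × Int)) :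
    l.foldl (fun result p => if p.2 = k then result + p.1 else result) a
      = a + (l.map (fun p => if p.2 = k then p.1 else 0)).sum := by
  induction l generalizing a with
  | nil => simp
  | cons p t ih => by_cases h : p.2 = k <;> simp [h, ih] <;> try ring

theorem portA_specSum (nums : List Int) (k : Int) :
    k_frequency_element_sum nums k = specSum k nums := by
  unfold k_frequency_element_sum specSum
  simp only [PySem.Dict.foldl_insert_getD_add_one_eq_counter, PySem.Dict.items_counter,
    foldl_if_pair]
  simp [List.map_map, Function.comp_def]

theorem splitRun_decomp (v : Int) (xs : List Int) :
    xs = List.replicate (splitRun v xs).1 v ++ (splitRun v xs).2 := by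
  induction xs with
  | nil => simp [splitRun]
  | cons x xs ih =>
    by_cases h : x = v
    · simp [splitRun, h, List.replicate_succ]
      exact ih
    · simp [splitRun, h]

theorem splitRun_rest_shape (v : Int) (xs : List Int) :
    (splitRun v xs).2 = [] ∨ ∃ x t, (splitRun v xs).2 = x :: t ∧ x ≠ v := by
  induction xs with
  | nil => left; simp [splitRun]
  | cons x xs ih =>
    by_cases h : x = v
    · simpa [splitRun, h] using ih
    · right; exact ⟨x, xs, by simp [splitRun, h], h⟩

theorem not_mem_splitRun_rest (v : Int) (xs : List Int)
    (hp : (v :: xs).Pairwise (· ≤ ·)) : v ∉ (splitRun v xs).2 := by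
  rcases splitRun_rest_shape v xs with h | ⟨x, t, heq, hx⟩
  · simp [h]
  · -- rest is a suffix of xs, pairwise-sorted; its head x ≠ v, and v ≤ x
    have hsub : (splitRun v xs).2.Sublist xs := by
      conv_rhs => rw [splitRun_decomp v xs]
      exact List.sublist_append_right _ _
    have hle : ∀ y ∈ xs, v ≤ y := (List.pairwise_cons.mp hp).1
    have hvx : v ≤ x := hle x (hsub.mem (by simp [heq]))
    have hvlt : v < x := lt_of_le_of_ne hvx (fun h => hx h.symm)
    have hpr : (x :: t).Pairwise (· ≤ ·) := heq ▸ List.Pairwise.sublist hsub (List.pairwise_cons.mp hp).2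
    rw [heq]
    intro hmem
    rcases List.mem_cons.mp hmem with h | h
    · exact hx h.symm
    · have := (List.pairwise_cons.mp hpr).1 v h
      omega

theorem splitRun_rest_pairwise (v : Int) (xs : List Int)
    (hp : xs.Pairwise (· ≤ ·)) : (splitRun v xs).2.Pairwise (· ≤ ·) := by
  have hsub : (splitRun v xs).2.Sublist xs := by
    conv_rhs => rw [splitRun_decomp v xs]
    exact List.sublist_append_right _ _
  exact List.Pairwise.sublist hsub hp

theorem specSum_perm (k : Int) {l l' : List Int} (h : l.Perm l') :
    specSum k l = specSum k l' := by
  unfold specSum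
  have hperm : (PySem.Set.ofList l).Perm (PySem.Set.ofList l') := by
    rw [List.perm_ext_iff_of_nodup (PySem.Set.nodup_ofList l) (PySem.Set.nodup_ofList l')]
    intro a; rw [PySem.Set.mem_ofList, PySem.Set.mem_ofList]; exact h.mem_iff
  rw [(hperm.map _).sum_eq]
  congr 1
  apply List.map_congr_left
  intro a _
  rw [h.count_eq]

theorem specSum_run (k v : Int) (xs : List Int)
    (hv : v ∉ (splitRun v xs).2) :
    specSum k (v :: xs)
      = (if ((splitRun v xs).1 + 1 : Int) = k then v else 0) + specSum k (splitRun v xs).2 := by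
  set n := (splitRun v xs).1 with hn
  set rest := (splitRun v xs).2 with hr
  have hxs : v :: xs = List.replicate (n + 1) v ++ rest := by
    conv_lhs => rw [splitRun_decomp v xs]
    simp [List.replicate_succ, ← hn, ← hr]
  have hvrest : v ∉ PySem.Set.ofList rest := by
    rw [PySem.Set.mem_ofList]; exact hv
  -- ofList (v :: xs) is a permutation of v :: ofList rest
  have hperm : (PySem.Set.ofList (v :: xs)).Perm (v :: PySem.Set.ofList rest) := by
    rw [List.perm_ext_iff_of_nodup (PySem.Set.nodup_ofList _)
      (List.nodup_cons.mpr ⟨hvrest, PySem.Set.nodup_ofList _⟩)]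
    intro a
    rw [PySem.Set.mem_ofList, hxs]
    simp [PySem.Set.mem_ofList, List.mem_replicate]
    try tauto
  have hcv : ((v :: xs).count v : Int) = (n : Int) + 1 := by
    rw [hxs, List.count_append, List.count_replicate]
    simp [List.count_eq_zero_of_not_mem hv]
  have hcw : ∀ w ∈ PySem.Set.ofList rest, (v :: xs).count w = rest.count w := by
    intro w hw
    have hwv : w ≠ v := by
      rw [PySem.Set.mem_ofList] at hw
      intro h; exact hv (h ▸ hw)
    rw [hxs, List.count_append, List.count_replicate]
    simp [Ne.symm hwv]
  unfold specSum
  rw [(hperm.map _).sum_eq]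
  simp only [List.map_cons, List.sum_cons, hcv]
  have : ∀ w ∈ PySem.Set.ofList rest,
      (if (((v :: xs).count w : Int)) = k then w else 0)
        = (if ((rest.count w : Int)) = k then w else 0) := by
    intro w hw; rw [hcw w hw]
  rw [List.map_congr_left this]

theorem runEnd_splitRun (s : List Int) (v : Int) (j : Nat) (hj : j ≤ s.length) :
    runEnd s v s.length j = j + (splitRun v (s.drop j)).1 ∧
      s.drop (runEnd s v s.length j) = (splitRun v (s.drop j)).2 := by
  induction hd : s.length - j using Nat.strong_induction_on generalizing j with
  | _ d ih =>
    by_cases h : j < s.length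
    · have hdrop : s.drop j = s[j] :: s.drop (j + 1) := List.drop_eq_getElem_cons h
      have hgd : s.getD j 0 = s[j] := List.getD_eq_getElem s 0 h
      by_cases hv : s[j] = v
      · have hrec := ih (s.length - (j + 1)) (by omega) (j + 1) (by omega) rfl
        rw [runEnd, if_pos ⟨h, by rw [hgd, hv]⟩]
        rw [hdrop]
        simp only [splitRun, if_pos hv]
        constructor
        · omega
        · exact hrec.2
      · rw [runEnd, if_neg (by rw [hgd]; tauto)]
        simp only [hdrop]
        simp [splitRun, hv]
    · have hje : j = s.length := by omega
      have hnil : s.drop j = [] := List.drop_eq_nil_of_le (by omega)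
      rw [runEnd, if_neg (by tauto), hnil]
      simp [splitRun]

theorem outerB_specSum (k : Int) (s : List Int) (hp : s.Pairwise (· ≤ ·)) :
    ∀ (d i : Nat), i ≤ s.length → s.length - i ≤ d → ∀ (total : Int),
      (s.drop i).Pairwise (· ≤ ·) →
      outerB k s s.length i total = total + specSum k (s.drop i) := by
  intro d
  induction d with
  | zero =>
    intro i hi hd total _
    have hie : i = s.length := by omega
    rw [outerB, if_neg (by omega), hie]
    simp [specSum, PySem.Set.ofList]
  | succ m ih =>
    intro i hi hd total hip
    by_cases h : i < s.length
    · have hdrop : s.drop i = s[i] :: s.drop (i + 1) := List.drop_eq_getElem_cons h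
      have hgd : s.getD i 0 = s[i] := List.getD_eq_getElem s 0 h
      set v := s[i] with hv
      have hre := runEnd_splitRun s v (i + 1) (by omega)
      have hip' : (v :: s.drop (i + 1)).Pairwise (· ≤ ·) := hdrop ▸ hip
      have hnm : v ∉ (splitRun v (s.drop (i + 1))).2 :=
        not_mem_splitRun_rest v (s.drop (i + 1)) hip'
      have hlen := splitRun_len_le v (s.drop (i + 1))
      have hlendrop : (s.drop (i + 1)).length = s.length - (i + 1) := List.length_drop ..
      have hsl : (splitRun v (s.drop (i + 1))).1 + (splitRun v (s.drop (i + 1))).2.length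
          = (s.drop (i + 1)).length := by
        conv_rhs => rw [splitRun_decomp v (s.drop (i + 1))]
        simp
      rw [outerB, if_pos h]
      simp only [hgd]
      rw [hre.1]
      have hj2 : s.drop (i + 1 + (splitRun v (s.drop (i + 1))).1) = (splitRun v (s.drop (i + 1))).2 := by
        rw [← hre.1]; exact hre.2
      rw [ih (i + 1 + (splitRun v (s.drop (i + 1))).1) (by omega) (by omega) _
        (by rw [hj2]; exact splitRun_rest_pairwise v _ (List.pairwise_cons.mp hip').2)]
      rw [hj2, hdrop, specSum_run k v (s.drop (i + 1)) hnm]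
      have hcast : ((i + 1 + (splitRun v (s.drop (i + 1))).1 : Nat) : Int) - (i : Int)
          = ((splitRun v (s.drop (i + 1))).1 : Int) + 1 := by push_cast; ring
      rw [hcast]
      ring
    · have hie : i = s.length := by omega
      rw [outerB, if_neg (by omega), hie]
      simp [specSum, PySem.Set.ofList]

-- ===== VERDICT (by name: the statement is the Claim_ definition above) =====
theorem k_frequency_element_sum_spec : Claim_equal_k_frequency_element_sum := by
  intro nums k _
  unfold Spec_k_frequency_element_sum k_frequency_element_sum_alt
  have hp : (PySem.List.sorted nums (fun x => x) false).Pairwise (· ≤ ·) := by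
    simpa using PySem.List.sorted_pairwise nums (fun x => x)
  rw [portA_specSum]
  rw [outerB_specSum k _ hp (PySem.List.sorted nums (fun x => x) false).length 0
    (by omega) (by omega) 0 (by simpa using hp)]
  simp only [List.drop_zero]
  rw [specSum_perm k (PySem.List.sorted_perm nums (fun x => x) false)]
  ring
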